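-- pv_equiv track=rewrite | github.com/lliurex/accesshelper | src/stacks/access.py | sortArraySettings
-- ===== SOURCE A (Python) =====
-- def sortArraySettings(settings):
-- 	ordArray=[]
-- 	ordDict={}
-- 	for name,value in settings:
-- 		if "bell" in name.lower():
-- 			bell=ordDict.get('bell',[])
-- 			bell.append((name,value))
-- 			ordDict['bell']=bell
-- 		elif "mouse" in name.lower():
-- 			mouse=ordDict.get('mouse',[])
-- 			mouse.append((name,value))
-- 			ordDict['mouse']=mouse
-- 		else:
-- 			other=ordDict.get('other',[])
-- 			other.append((name,value))
-- 			ordDict['other']=other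
-- 	for key,item in ordDict.items():
-- 		ordArray.extend(item)
--
-- 	return(ordArray)
-- ===== SOURCE B (Python) =====
-- def sortArraySettings(settings):
-- 	items = list(settings)
--
-- 	def _category(name):
-- 		n = name.lower()
-- 		if "bell" in n:
-- 			return "bell"
-- 		if "mouse" in n:
-- 			return "mouse"
-- 		return "other"
--
-- 	order = []
-- 	for name, _value in items:
-- 		c = _category(name)
-- 		if c not in order:
-- 			order.append(c)
-- 	return [nv for c in order for nv in items if _category(nv[0]) == c]
-- ===== Notes on version B (the rewrite author's own statement) =====
-- stated objective: alternative
-- what changed: Instead of building per-category buckets in a dict during one pass and concatenating them, B records the first-seen order of categories and then emits, for each category in that order, the items selected by a filter pass over the list.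
import Mathlib
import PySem

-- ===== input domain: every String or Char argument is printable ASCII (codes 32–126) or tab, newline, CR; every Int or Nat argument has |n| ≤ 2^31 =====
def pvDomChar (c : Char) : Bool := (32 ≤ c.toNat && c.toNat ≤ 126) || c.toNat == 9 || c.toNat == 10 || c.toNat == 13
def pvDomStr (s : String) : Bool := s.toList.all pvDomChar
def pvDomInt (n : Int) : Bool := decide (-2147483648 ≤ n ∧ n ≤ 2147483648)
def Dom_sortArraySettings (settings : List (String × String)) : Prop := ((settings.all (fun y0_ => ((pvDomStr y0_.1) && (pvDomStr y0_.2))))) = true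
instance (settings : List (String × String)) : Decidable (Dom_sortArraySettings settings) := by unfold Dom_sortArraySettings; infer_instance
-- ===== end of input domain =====

-- B replaces A's single-pass dict-of-buckets + concatenation by a first-seen category order
-- plus one filter pass per category (alternative decomposition; same return value).

-- ===== PORT A =====
def sortArraySettings (settings : List (String × String)) : List (String × String) :=
  let ordDict := settings.foldl (fun d nv =>
    if PySem.Str.isIn "bell" (PySem.Str.lower nv.1) then
      let bell := d.getD "bell" []
      d.insert "bell" (bell ++ [nv])
    else if PySem.Str.isIn "mouse" (PySem.Str.lower nv.1) then
      let mouse := d.getD "mouse" []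
      d.insert "mouse" (mouse ++ [nv])
    else
      let other := d.getD "other" []
      d.insert "other" (other ++ [nv])) (PySem.Dict.empty : PySem.Dict String (List (String × String)))
  ordDict.items.foldl (fun acc p => acc ++ p.2) []

-- ===== PORT B =====
-- helper `_category` of Source B
def pvCategory (name : String) : String :=
  let n := PySem.Str.lower name
  if PySem.Str.isIn "bell" n then "bell"
  else if PySem.Str.isIn "mouse" n then "mouse"
  else "other"

def sortArraySettings_alt (settings : List (String × String)) : List (String × String) :=
  let order := settings.foldl (fun cs nv =>
    if pvCategory nv.1 ∈ cs then cs else cs ++ [pvCategory nv.1]) ([] : List String)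
  order.flatMap (fun c => settings.filter (fun nv => pvCategory nv.1 == c))

-- ===== PRECONDITION & SPEC =====
def Spec_sortArraySettings (settings : List (String × String)) (out : List (String × String)) : Prop := out = sortArraySettings_alt settings
instance (settings : List (String × String)) (out : List (String × String)) : Decidable (Spec_sortArraySettings settings out) := by unfold Spec_sortArraySettings; infer_instance

-- ===== CLAIM (what is proved, stated in full; the proofs are below) =====
def Claim_equal_sortArraySettings : Prop := ∀ (settings : List (String × String)), Dom_sortArraySettings settings → Spec_sortArraySettings settings (sortArraySettings settings)

-- ===== LEMMAS AND PROOFS =====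

-- the dict A builds, rewritten as a keyed modify-fold over (category, item) pairs
def pvD (settings : List (String × String)) : PySem.Dict String (List (String × String)) :=
  (settings.map (fun nv => (pvCategory nv.1, nv))).foldl
    (fun d (p : String × String × String) => d.modify p.1 [] (· ++ [p.2])) PySem.Dict.empty

-- A's loop body is exactly `d.modify (pvCategory nv.1) [] (· ++ [nv])`
theorem pvStepA_eq (d : PySem.Dict String (List (String × String))) (nv : String × String) :
    (if PySem.Str.isIn "bell" (PySem.Str.lower nv.1) then
      let bell := d.getD "bell" []
      d.insert "bell" (bell ++ [nv])
    else if PySem.Str.isIn "mouse" (PySem.Str.lower nv.1) then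
      let mouse := d.getD "mouse" []
      d.insert "mouse" (mouse ++ [nv])
    else
      let other := d.getD "other" []
      d.insert "other" (other ++ [nv]))
    = d.modify (pvCategory nv.1) [] (· ++ [nv]) := by
  simp only [pvCategory]
  split_ifs <;> rfl

theorem pvD_keys (settings : List (String × String)) :
    (pvD settings).keys = PySem.Set.ofList (settings.map (fun nv => pvCategory nv.1)) := by
  unfold pvD
  rw [PySem.Dict.keys_foldl_modify_key]
  simp [PySem.Set.update_nil_left, Function.comp_def]

theorem pvD_nodup (settings : List (String × String)) : (pvD settings).keys.Nodup := by
  unfold pvD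
  exact PySem.Dict.nodup_keys_foldl_modify_key _ (fun p : String × String × String => p.1)
    ([] : List (String × String)) (fun d (p : String × String × String) => (· ++ [p.2]))
    PySem.Dict.empty (by simp)

theorem pvD_getD (settings : List (String × String)) (c : String) :
    (pvD settings).getD c [] = settings.filter (fun nv => pvCategory nv.1 == c) := by
  unfold pvD
  rw [PySem.Dict.getD_foldl_modify_append, PySem.Dict.getD_empty]
  rw [List.filter_map, List.map_map]
  simp [Function.comp_def]

theorem pvOrder_eq (settings : List (String × String)) :
    settings.foldl (fun cs nv =>
      if pvCategory nv.1 ∈ cs then cs else cs ++ [pvCategory nv.1]) ([] : List String)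
    = PySem.Set.ofList (settings.map (fun nv => pvCategory nv.1)) := by
  rw [PySem.Set.ofList_eq_foldl, List.foldl_map]
  apply PySem.List.foldl_congr_mem
  intro cs nv _
  simp [PySem.Set.add, PySem.Set.contains]

theorem sortArraySettings_spec' (settings : List (String × String)) :
    sortArraySettings settings = sortArraySettings_alt settings := by
  unfold sortArraySettings sortArraySettings_alt
  rw [pvOrder_eq]
  have hstep : settings.foldl (fun d nv =>
      if PySem.Str.isIn "bell" (PySem.Str.lower nv.1) then
        let bell := d.getD "bell" []
        d.insert "bell" (bell ++ [nv])
      else if PySem.Str.isIn "mouse" (PySem.Str.lower nv.1) then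
        let mouse := d.getD "mouse" []
        d.insert "mouse" (mouse ++ [nv])
      else
        let other := d.getD "other" []
        d.insert "other" (other ++ [nv])) (PySem.Dict.empty : PySem.Dict String (List (String × String)))
      = pvD settings := by
    unfold pvD
    rw [List.foldl_map]
    refine PySem.List.foldl_congr_mem _ _ _ _ ?_
    intro d nv _
    exact pvStepA_eq d nv
  rw [hstep]
  rw [PySem.List.foldl_append_eq_flatMap,
      PySem.Dict.items_eq_map_keys (pvD settings) (pvD_nodup settings) [],
      List.flatMap_map, pvD_keys]
  simp only [pvD_getD, List.nil_append]

-- ===== VERDICT (by name: the statement is the Claim_ definition above) =====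
theorem sortArraySettings_spec : Claim_equal_sortArraySettings := by
  intro settings _
  exact sortArraySettings_spec' settings
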